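-- pv_equiv track=rewrite | github.com/Mayotomiwa/lumos_assessment | test.py | find_largest_even_square
-- ===== SOURCE A (Python) =====
-- def find_largest_even_square(numbers):
--     # Initialize the largest even number to be negative infinity
--     largest_even = float('-inf')
--
--     # Iterate over the numbers in the array
--     for num in numbers:
--         # If the number is even and greater than the current largest even number
--         if num % 2 == 0 and num > largest_even:
--             largest_even = num
--
--     # If no even number was found, return None
--     if largest_even == float('-inf'):
--         return None
--
--     # Return the square of the largest even number
--     return largest_even ** 2
-- ===== SOURCE B (Python) =====
-- def find_largest_even_square(numbers):
--     # Sort descending, then the first even number encountered is the largest even.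
--     for n in sorted(numbers, reverse=True):
--         if n % 2 == 0:
--             return n * n
--     return None
-- ===== Notes on version B (the rewrite author's own statement) =====
-- stated objective: alternative
-- what changed: Replaced the single-pass running-max-with-sentinel loop by sort-then-scan: sort descending and return the square of the first even element found.
import Mathlib
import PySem

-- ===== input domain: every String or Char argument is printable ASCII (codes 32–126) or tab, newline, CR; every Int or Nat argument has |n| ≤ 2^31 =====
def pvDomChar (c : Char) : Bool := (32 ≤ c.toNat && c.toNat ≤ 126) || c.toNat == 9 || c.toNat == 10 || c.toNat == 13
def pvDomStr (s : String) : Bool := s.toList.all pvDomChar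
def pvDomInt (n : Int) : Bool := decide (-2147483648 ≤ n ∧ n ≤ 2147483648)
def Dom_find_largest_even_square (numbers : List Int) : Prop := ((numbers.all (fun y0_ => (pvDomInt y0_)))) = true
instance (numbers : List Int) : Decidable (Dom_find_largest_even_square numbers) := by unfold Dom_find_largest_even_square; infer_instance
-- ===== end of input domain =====

-- B replaces A's single-pass running-max loop with sort-then-scan: sort descending, square the first even element (objective: alternative).
-- ===== PORT A =====
def pvStepA (acc : Option Int) (num : Int) : Option Int :=
  -- 'num % 2 == 0 and num > largest_even' with largest_even = -inf modelled as none
  if (PySem.Int.mod num 2 == 0) && (acc.elim true (fun a => decide (a < num))) then some num else acc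

def find_largest_even_square (numbers : List Int) : Option Int :=
  let largest_even := numbers.foldl pvStepA none
  match largest_even with
  | none => none
  | some a => some (a ^ 2)

-- ===== PORT B =====
def pvFirstEvenSq : List Int → Option Int
  | [] => none
  | n :: t => if PySem.Int.mod n 2 == 0 then some (n * n) else pvFirstEvenSq t

def find_largest_even_square_alt (numbers : List Int) : Option Int :=
  pvFirstEvenSq (PySem.List.sorted numbers (fun x => x) true)

-- ===== PRECONDITION & SPEC =====
def Spec_find_largest_even_square (numbers : List Int) (out : Option Int) : Prop := out = find_largest_even_square_alt numbers
instance (numbers : List Int) (out : Option Int) : Decidable (Spec_find_largest_even_square numbers out) := by unfold Spec_find_largest_even_square; infer_instance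

-- ===== CLAIM (what is proved, stated in full; the proofs are below) =====
def Claim_equal_find_largest_even_square : Prop := ∀ (numbers : List Int), Dom_find_largest_even_square numbers → Spec_find_largest_even_square numbers (find_largest_even_square numbers)

-- ===== LEMMAS AND PROOFS =====
def pvOptMax (acc : Option Int) (n : Int) : Option Int :=
  match acc with
  | none => some n
  | some a => some (max a n)

theorem pvStepA_even (acc : Option Int) (n : Int) (h : (PySem.Int.mod n 2 == 0) = true) :
    pvStepA acc n = pvOptMax acc n := by
  cases acc with
  | none =>
    show (if (PySem.Int.mod n 2 == 0) && true then some n else none) = some n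
    rw [h]; rfl
  | some a =>
    show (if (PySem.Int.mod n 2 == 0) && decide (a < n) then some n else some a)
        = some (max a n)
    rw [h]
    by_cases hlt : a < n
    · simp [hlt, max_eq_right (le_of_lt hlt)]
    · simp [hlt, max_eq_left (le_of_not_gt hlt)]

theorem pvStepA_odd (acc : Option Int) (n : Int) (h : (PySem.Int.mod n 2 == 0) = false) :
    pvStepA acc n = acc := by
  cases acc with
  | none =>
    show (if (PySem.Int.mod n 2 == 0) && true then some n else none) = none
    rw [h]; rfl
  | some a =>
    show (if (PySem.Int.mod n 2 == 0) && decide (a < n) then some n else some a) = some a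
    rw [h]; rfl

-- A's loop is the running max over the even elements
theorem pvLoop_eq (xs : List Int) (acc : Option Int) :
    xs.foldl pvStepA acc
      = (xs.filter (fun n => PySem.Int.mod n 2 == 0)).foldl pvOptMax acc := by
  induction xs generalizing acc with
  | nil => rfl
  | cons x t ih =>
    rcases hx : (PySem.Int.mod x 2 == 0) with _ | _
    · simp only [List.foldl_cons, List.filter_cons, hx, pvStepA_odd acc x hx, ih,
        Bool.false_eq_true, if_false]
    · simp only [List.foldl_cons, List.filter_cons, hx, pvStepA_even acc x hx, ih, if_true]

theorem pvOptMax_leftComm (a : Option Int) (x y : Int) :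
    pvOptMax (pvOptMax a x) y = pvOptMax (pvOptMax a y) x := by
  cases a <;> simp [pvOptMax, max_comm, max_left_comm]

-- foldl pvOptMax is invariant under permutation
theorem pvFold_perm (xs ys : List Int) (h : xs.Perm ys) (acc : Option Int) :
    xs.foldl pvOptMax acc = ys.foldl pvOptMax acc := by
  induction h generalizing acc with
  | nil => rfl
  | cons x _ ih => simp only [List.foldl_cons, ih]
  | swap x y _ => simp only [List.foldl_cons, pvOptMax_leftComm]
  | trans _ _ ih1 ih2 => exact (ih1 acc).trans (ih2 acc)

theorem pvFold_absorb (t : List Int) (a : Int) (h : ∀ y ∈ t, y ≤ a) :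
    t.foldl pvOptMax (some a) = some a := by
  induction t with
  | nil => rfl
  | cons x t ih =>
    have hx : x ≤ a := h x (List.mem_cons_self)
    simp only [List.foldl_cons, pvOptMax, max_eq_left hx]
    exact ih (fun y hy => h y (List.mem_cons_of_mem _ hy))

-- scanning a descending list for the first even = the max over the even elements, squared
theorem pvScan_eq (s : List Int) (hs : s.Pairwise (fun a b => b ≤ a)) :
    pvFirstEvenSq s
      = match (s.filter (fun n => PySem.Int.mod n 2 == 0)).foldl pvOptMax none with
        | none => none
        | some m => some (m * m) := by
  induction s with
  | nil => rfl
  | cons n t ih =>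
    rcases List.pairwise_cons.mp hs with ⟨hle, ht⟩
    rcases hn : (PySem.Int.mod n 2 == 0) with _ | _
    · simp only [pvFirstEvenSq, hn, Bool.false_eq_true, if_false, List.filter_cons, ih ht]
    · simp only [pvFirstEvenSq, hn, if_true, List.filter_cons]
      have habs : (t.filter (fun n => PySem.Int.mod n 2 == 0)).foldl pvOptMax (some n) = some n :=
        pvFold_absorb _ n (fun y hy => hle y (List.mem_of_mem_filter hy))
      simp only [List.foldl_cons, pvOptMax, habs]

-- ===== VERDICT (by name: the statement is the Claim_ definition above) =====
theorem find_largest_even_square_spec : Claim_equal_find_largest_even_square := by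
  intro numbers _
  show find_largest_even_square numbers = find_largest_even_square_alt numbers
  unfold find_largest_even_square find_largest_even_square_alt
  have hperm : (PySem.List.sorted numbers (fun x => x) true).Perm numbers :=
    PySem.List.sorted_perm numbers (fun x => x) true
  have hpw : (PySem.List.sorted numbers (fun x => x) true).Pairwise (fun a b => b ≤ a) :=
    PySem.List.sorted_pairwise_rev numbers (fun x => x)
  rw [pvScan_eq _ hpw, pvLoop_eq,
    pvFold_perm _ _ (hperm.filter (fun n => PySem.Int.mod n 2 == 0)) none]
  cases (numbers.filter (fun n => PySem.Int.mod n 2 == 0)).foldl pvOptMax none with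
  | none => rfl
  | some m => simp [pow_two]
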